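-- pv_equiv track=rewrite | github.com/sqlfluff/sqlfluff | plugins/sqlfluff-templater-sqlmesh/sqlfluff_templater_sqlmesh/templater.py | _coalesce_diff_opcodes
-- ===== SOURCE A (Python) =====
-- def _coalesce_diff_opcodes(
--     opcodes: list[tuple[str, int, int, int, int]],
-- ) -> list[tuple[str, int, int, int, int]]:
--     """Merge diff opcodes so that no ``delete`` or ``insert`` stands alone.
--
--     ``difflib.SequenceMatcher`` can split a single macro expansion like
--     ``@if(@DEV, 'dev', 'prod')`` into ``delete + equal('dev') + delete``
--     because the literal ``'dev'`` is a common substring. Those isolated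
--     ``delete`` opcodes would produce zero-length template slices that
--     confuse SQLFluff's position-mapping logic.
--
--     This method coalesces every run of non-``equal`` opcodes (and any
--     ``equal`` opcodes sandwiched between them) into a single ``replace``.
--     """
--     if not opcodes:
--         return opcodes
--
--     result: list[tuple[str, int, int, int, int]] = []
--     i = 0
--     while i < len(opcodes):
--         tag = opcodes[i][0]
--         if tag == "equal":
--             result.append(opcodes[i])
--             i += 1
--             continue
--
--         # Start of a non-equal run — accumulate until we find a
--         # standalone equal (one not followed by another non-equal).
--         _, run_i1, run_i2, run_j1, run_j2 = opcodes[i]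
--         i += 1
--         while i < len(opcodes):
--             next_tag = opcodes[i][0]
--             if next_tag != "equal":
--                 run_i2 = opcodes[i][2]
--                 run_j2 = opcodes[i][4]
--                 i += 1
--             elif (
--                 i + 1 < len(opcodes) and opcodes[i + 1][0] != "equal"
--             ):
--                 # Equal sandwiched between non-equals — absorb both.
--                 run_i2 = opcodes[i + 1][2]
--                 run_j2 = opcodes[i + 1][4]
--                 i += 2
--             else:
--                 break
--
--         result.append(("replace", run_i1, run_i2, run_j1, run_j2))
--
--     return result
-- ===== SOURCE B (Python) =====
-- def _coalesce_diff_opcodes(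
--     opcodes: list[tuple[str, int, int, int, int]],
-- ) -> list[tuple[str, int, int, int, int]]:
--     """Two-pass rewrite: classify each opcode first, then fold runs.
--
--     Pass 1 flags every opcode that must be merged: any non-``equal``
--     opcode, plus any ``equal`` opcode sandwiched between two non-``equal``
--     neighbours.  Pass 2 is a single fold keeping an optional pending
--     merged span: flagged opcodes extend the pending span, unflagged
--     (standalone ``equal``) opcodes flush it as one ``replace``.
--     """
--     if not opcodes:
--         return opcodes
--
--     tags = [op[0] for op in opcodes]
--     flags = [
--         t != "equal" or (p != "equal" and nx != "equal")
--         for t, p, nx in zip(tags, ["equal"] + tags, tags[1:] + ["equal"])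
--     ]
--
--     out: list[tuple[str, int, int, int, int]] = []
--     pending = None  # open merged span (i1, i2, j1, j2)
--     for op, flag in zip(opcodes, flags):
--         if flag:
--             if pending is None:
--                 pending = (op[1], op[2], op[3], op[4])
--             else:
--                 pending = (pending[0], op[2], pending[2], op[4])
--         else:
--             if pending is not None:
--                 out.append(("replace",) + pending)
--                 pending = None
--             out.append(op)
--     if pending is not None:
--         out.append(("replace",) + pending)
--     return out
-- ===== Notes on version B (the rewrite author's own statement) =====
-- stated objective: alternative
-- what changed: Replaced A's single-pass while loop with nested run-absorbing inner loop and i+=2 sandwich skips by a two-pass design: a neighbour-based classification pass flagging every opcode to merge, then one fold that flushes/extends an optional pending span.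
import Mathlib
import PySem

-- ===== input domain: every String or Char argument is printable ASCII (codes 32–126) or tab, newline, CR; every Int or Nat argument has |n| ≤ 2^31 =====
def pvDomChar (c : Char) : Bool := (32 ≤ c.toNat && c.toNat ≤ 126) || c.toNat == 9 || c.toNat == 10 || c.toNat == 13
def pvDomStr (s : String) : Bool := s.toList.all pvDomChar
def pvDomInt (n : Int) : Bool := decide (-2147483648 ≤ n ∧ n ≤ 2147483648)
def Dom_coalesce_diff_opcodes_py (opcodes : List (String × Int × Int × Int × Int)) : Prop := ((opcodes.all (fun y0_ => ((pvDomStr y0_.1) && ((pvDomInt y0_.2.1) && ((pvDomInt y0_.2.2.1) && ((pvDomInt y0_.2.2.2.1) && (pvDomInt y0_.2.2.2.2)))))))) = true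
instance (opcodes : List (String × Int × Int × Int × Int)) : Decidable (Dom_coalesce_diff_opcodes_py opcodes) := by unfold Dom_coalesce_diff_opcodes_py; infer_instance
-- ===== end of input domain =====

-- B replaces A's single while-loop with nested run-absorption by a two-pass
-- neighbour-classification + fold design ("alternative": same O(n) cost).

-- ===== PORT A =====
-- A's outer while loop (pvALoop) and its inner non-equal-run loop (pvARun),
-- ported as mutual recursion over the remaining opcodes; the `break` resumes
-- the outer loop at the standalone equal (same list position).
mutual
def pvALoop : List (String × Int × Int × Int × Int) → List (String × Int × Int × Int × Int)
  | [] => []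
  | x :: rest =>
    if x.1 = "equal" then x :: pvALoop rest
    else pvARun x.2.1 x.2.2.1 x.2.2.2.1 x.2.2.2.2 rest
termination_by xs => (xs.length, 0)

def pvARun (run_i1 run_i2 run_j1 run_j2 : Int) :
    List (String × Int × Int × Int × Int) → List (String × Int × Int × Int × Int)
  | [] => [("replace", run_i1, run_i2, run_j1, run_j2)]
  | x :: rest =>
    if x.1 ≠ "equal" then pvARun run_i1 x.2.2.1 run_j1 x.2.2.2.2 rest
    else
      match rest with
      | y :: rest2 =>
        if y.1 ≠ "equal" then pvARun run_i1 y.2.2.1 run_j1 y.2.2.2.2 rest2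
        else ("replace", run_i1, run_i2, run_j1, run_j2) :: pvALoop (x :: y :: rest2)
      | [] => ("replace", run_i1, run_i2, run_j1, run_j2) :: pvALoop [x]
termination_by xs => (xs.length, 1)
end

def coalesce_diff_opcodes_py (opcodes : List (String × Int × Int × Int × Int)) : List (String × Int × Int × Int × Int) :=
  if opcodes = [] then opcodes else pvALoop opcodes

-- ===== PORT B =====
def pvRepl (p : Int × Int × Int × Int) : String × Int × Int × Int × Int :=
  ("replace", p.1, p.2.1, p.2.2.1, p.2.2.2)

-- pass 1: flags from zipping each tag with its padded neighbours
def pvBFlags (opcodes : List (String × Int × Int × Int × Int)) : List Bool :=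
  let tags := opcodes.map (·.1)
  (tags.zip ((["equal"] ++ tags).zip (tags.drop 1 ++ ["equal"]))).map
    (fun tpn => decide (tpn.1 ≠ "equal") || (decide (tpn.2.1 ≠ "equal") && decide (tpn.2.2 ≠ "equal")))

-- pass 2: one fold step over (opcode, flag)
def pvBStep (st : List (String × Int × Int × Int × Int) × Option (Int × Int × Int × Int))
    (xf : (String × Int × Int × Int × Int) × Bool) :
    List (String × Int × Int × Int × Int) × Option (Int × Int × Int × Int) :=
  if xf.2 then
    match st.2 with
    | none => (st.1, some (xf.1.2.1, xf.1.2.2.1, xf.1.2.2.2.1, xf.1.2.2.2.2))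
    | some p => (st.1, some (p.1, xf.1.2.2.1, p.2.2.1, xf.1.2.2.2.2))
  else
    match st.2 with
    | none => (st.1 ++ [xf.1], none)
    | some p => (st.1 ++ [pvRepl p, xf.1], none)

def coalesce_diff_opcodes_py_alt (opcodes : List (String × Int × Int × Int × Int)) : List (String × Int × Int × Int × Int) :=
  if opcodes = [] then opcodes
  else
    let r := (opcodes.zip (pvBFlags opcodes)).foldl pvBStep ([], none)
    match r.2 with
    | none => r.1
    | some p => r.1 ++ [pvRepl p]

-- ===== PRECONDITION & SPEC =====
def Spec_coalesce_diff_opcodes_py (opcodes : List (String × Int × Int × Int × Int)) (out : List (String × Int × Int × Int × Int)) : Prop := out = coalesce_diff_opcodes_py_alt opcodes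
instance (opcodes : List (String × Int × Int × Int × Int)) (out : List (String × Int × Int × Int × Int)) : Decidable (Spec_coalesce_diff_opcodes_py opcodes out) := by unfold Spec_coalesce_diff_opcodes_py; infer_instance

-- ===== CLAIM (what is proved, stated in full; the proofs are below) =====
def Claim_equal_coalesce_diff_opcodes_py : Prop := ∀ (opcodes : List (String × Int × Int × Int × Int)), Dom_coalesce_diff_opcodes_py opcodes → Spec_coalesce_diff_opcodes_py opcodes (coalesce_diff_opcodes_py opcodes)

-- ===== LEMMAS AND PROOFS =====

-- unfolding equations for the well-founded mutual pair
lemma pvALoop_nil : pvALoop [] = [] := by rw [pvALoop.eq_def]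

lemma pvALoop_cons (x : String × Int × Int × Int × Int) (rest) :
    pvALoop (x :: rest) =
      if x.1 = "equal" then x :: pvALoop rest
      else pvARun x.2.1 x.2.2.1 x.2.2.2.1 x.2.2.2.2 rest := by
  rw [pvALoop.eq_def]

lemma pvARun_nil (i1 i2 j1 j2 : Int) :
    pvARun i1 i2 j1 j2 [] = [("replace", i1, i2, j1, j2)] := by
  rw [pvARun.eq_def]

lemma pvARun_cons (i1 i2 j1 j2 : Int) (x : String × Int × Int × Int × Int) (rest) :
    pvARun i1 i2 j1 j2 (x :: rest) =
      if x.1 ≠ "equal" then pvARun i1 x.2.2.1 j1 x.2.2.2.2 rest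
      else
        match rest with
        | y :: rest2 =>
          if y.1 ≠ "equal" then pvARun i1 y.2.2.1 j1 y.2.2.2.2 rest2
          else ("replace", i1, i2, j1, j2) :: pvALoop (x :: y :: rest2)
        | [] => ("replace", i1, i2, j1, j2) :: pvALoop [x] := by
  rw [pvARun.eq_def]

-- whether the head (next opcode) has a non-"equal" tag; [] counts as "equal" pad
def pvHeadNE : List (String × Int × Int × Int × Int) → Bool
  | [] => false
  | y :: _ => decide (y.1 ≠ "equal")

-- recursive form of B's flag-annotated list, parameterised by whether the
-- previous tag was non-"equal"
def pvAnn (prevNE : Bool) : List (String × Int × Int × Int × Int) → List ((String × Int × Int × Int × Int) × Bool)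
  | [] => []
  | x :: rest =>
    (x, decide (x.1 ≠ "equal") || (prevNE && pvHeadNE rest)) :: pvAnn (decide (x.1 ≠ "equal")) rest

-- B's result as a function of the pending state and the annotated list
def pvG (pending : Option (Int × Int × Int × Int))
    (l : List ((String × Int × Int × Int × Int) × Bool)) : List (String × Int × Int × Int × Int) :=
  let r := l.foldl pvBStep ([], pending)
  match r.2 with
  | none => r.1
  | some p => r.1 ++ [pvRepl p]

lemma pvZip_eq_ann (xs : List (String × Int × Int × Int × Int)) (p : String) :
    xs.zip (((xs.map (·.1)).zip ((p :: xs.map (·.1)).zip ((xs.map (·.1)).drop 1 ++ ["equal"]))).map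
      (fun tpn => decide (tpn.1 ≠ "equal") || (decide (tpn.2.1 ≠ "equal") && decide (tpn.2.2 ≠ "equal"))))
    = pvAnn (decide (p ≠ "equal")) xs := by
  induction xs generalizing p with
  | nil => rfl
  | cons x rest ih =>
    cases rest with
    | nil => simp [pvAnn, pvHeadNE]
    | cons y rest2 =>
      simpa [pvAnn, pvHeadNE] using ih (p := x.1)

lemma pvBStep_out (out : List (String × Int × Int × Int × Int)) (pending : Option (Int × Int × Int × Int))
    (a : (String × Int × Int × Int × Int) × Bool) :
    pvBStep (out, pending) a = (out ++ (pvBStep ([], pending) a).1, (pvBStep ([], pending) a).2) := by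
  cases pending <;> by_cases h : a.2 <;> simp [pvBStep, h]

lemma pvFoldl_out (l : List ((String × Int × Int × Int × Int) × Bool))
    (out : List (String × Int × Int × Int × Int)) (pending : Option (Int × Int × Int × Int)) :
    l.foldl pvBStep (out, pending)
      = (out ++ (l.foldl pvBStep ([], pending)).1, (l.foldl pvBStep ([], pending)).2) := by
  induction l generalizing out pending with
  | nil => simp
  | cons a l ih =>
    rcases hs : pvBStep ([], pending) a with ⟨s1, s2⟩
    rw [List.foldl_cons, List.foldl_cons, pvBStep_out out pending a, hs]
    show l.foldl pvBStep (out ++ s1, s2) = _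
    rw [ih (out ++ s1) s2, ih s1 s2]
    simp

lemma pvG_nil (pending : Option (Int × Int × Int × Int)) :
    pvG pending [] = match pending with | none => [] | some p => [pvRepl p] := by
  cases pending <;> rfl

lemma pvG_cons (pending : Option (Int × Int × Int × Int))
    (a : (String × Int × Int × Int × Int) × Bool) (l : List ((String × Int × Int × Int × Int) × Bool)) :
    pvG pending (a :: l) = (pvBStep ([], pending) a).1 ++ pvG (pvBStep ([], pending) a).2 l := by
  unfold pvG
  rcases hs : pvBStep ([], pending) a with ⟨s1, s2⟩
  rw [List.foldl_cons, hs]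
  show (match (l.foldl pvBStep (s1, s2)).2 with
        | none => (l.foldl pvBStep (s1, s2)).1
        | some p => (l.foldl pvBStep (s1, s2)).1 ++ [pvRepl p]) = _
  rw [pvFoldl_out l s1 s2]
  rcases h2 : (l.foldl pvBStep ([], s2)).2 with _ | p <;> simp [h2]

lemma pvG_cons_false_none (x : String × Int × Int × Int × Int) (l) :
    pvG none ((x, false) :: l) = x :: pvG none l := by
  rw [pvG_cons]; simp [pvBStep]

lemma pvG_cons_false_some (p : Int × Int × Int × Int) (x : String × Int × Int × Int × Int) (l) :
    pvG (some p) ((x, false) :: l) = pvRepl p :: x :: pvG none l := by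
  rw [pvG_cons]; simp [pvBStep]

lemma pvG_cons_true_none (x : String × Int × Int × Int × Int) (l) :
    pvG none ((x, true) :: l) = pvG (some (x.2.1, x.2.2.1, x.2.2.2.1, x.2.2.2.2)) l := by
  rw [pvG_cons]; simp [pvBStep]

lemma pvG_cons_true_some (p : Int × Int × Int × Int) (x : String × Int × Int × Int × Int) (l) :
    pvG (some p) ((x, true) :: l) = pvG (some (p.1, x.2.2.1, p.2.2.1, x.2.2.2.2)) l := by
  rw [pvG_cons]; simp [pvBStep]

lemma pvMain (n : Nat) : ∀ (xs : List (String × Int × Int × Int × Int)), xs.length ≤ n →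
    (pvALoop xs = pvG none (pvAnn false xs)) ∧
    (∀ i1 i2 j1 j2 : Int, pvARun i1 i2 j1 j2 xs = pvG (some (i1, i2, j1, j2)) (pvAnn true xs)) := by
  induction n with
  | zero =>
    intro xs h
    have hx : xs = [] := List.length_eq_zero_iff.mp (Nat.le_zero.mp h)
    subst hx
    exact ⟨by simp [pvALoop_nil, pvAnn, pvG_nil], fun i1 i2 j1 j2 => by
      simp [pvARun_nil, pvAnn, pvG_nil, pvRepl]⟩
  | succ n ih =>
    intro xs h
    cases xs with
    | nil =>
      exact ⟨by simp [pvALoop_nil, pvAnn, pvG_nil], fun i1 i2 j1 j2 => by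
        simp [pvARun_nil, pvAnn, pvG_nil, pvRepl]⟩
    | cons x rest =>
      have hrest : rest.length ≤ n := by simpa using Nat.lt_succ_iff.mp (by simpa using h)
      constructor
      · -- outer loop
        by_cases hx : x.1 = "equal"
        · rw [pvALoop_cons, if_pos hx]
          have hann : pvAnn false (x :: rest) = (x, false) :: pvAnn false rest := by
            simp [pvAnn, hx]
          rw [hann, pvG_cons_false_none, (ih rest hrest).1]
        · rw [pvALoop_cons, if_neg hx]
          have hann : pvAnn false (x :: rest) = (x, true) :: pvAnn true rest := by
            simp [pvAnn, hx]
          rw [hann, pvG_cons_true_none, (ih rest hrest).2]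
      · -- inner run loop
        intro i1 i2 j1 j2
        by_cases hx : x.1 = "equal"
        · -- head equal: look at the following opcode
          cases rest with
          | nil =>
            -- no following opcode → break; outer loop then emits the equal
            rw [pvARun_cons]
            simp only [hx, ne_eq, not_true_eq_false, if_false]
            have hann : pvAnn true [x] = [(x, false)] := by simp [pvAnn, pvHeadNE, hx]
            rw [hann, pvG_cons_false_some, pvG_nil]
            rw [pvALoop_cons, if_pos hx, pvALoop_nil]
            simp [pvRepl]
          | cons y rest2 =>
            have hrest2 : rest2.length ≤ n := by
              simp only [List.length_cons] at hrest; omega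
            by_cases hy : y.1 = "equal"
            · -- next is equal too → break; outer loop resumes at x
              rw [pvARun_cons]
              simp only [hx, hy, ne_eq, not_true_eq_false, if_false]
              have hann : pvAnn true (x :: y :: rest2)
                  = (x, false) :: pvAnn false (y :: rest2) := by
                simp [pvAnn, pvHeadNE, hx, hy]
              rw [hann, pvG_cons_false_some]
              rw [pvALoop_cons, if_pos hx, (ih (y :: rest2) (by simpa using hrest)).1]
              simp [pvRepl]
            · -- sandwiched equal → absorb it and the following non-equal
              rw [pvARun_cons]
              simp only [hx, hy, ne_eq, not_true_eq_false, if_false, not_false_eq_true, if_true]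
              have hann : pvAnn true (x :: y :: rest2)
                  = (x, true) :: (y, true) :: pvAnn (decide (y.1 ≠ "equal")) rest2 := by
                simp [pvAnn, pvHeadNE, hx, hy]
              rw [hann, pvG_cons_true_some, pvG_cons_true_some]
              have hd : (decide (y.1 ≠ "equal")) = true := by simp [hy]
              rw [hd, (ih rest2 hrest2).2]
        · -- head non-equal → absorb it into the run
          rw [pvARun_cons]
          simp only [hx, ne_eq, not_false_eq_true, if_true]
          have hann : pvAnn true (x :: rest)
              = (x, true) :: pvAnn (decide (x.1 ≠ "equal")) rest := by
            simp [pvAnn, hx]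
          rw [hann, pvG_cons_true_some]
          have hd : (decide (x.1 ≠ "equal")) = true := by simp [hx]
          rw [hd, (ih rest hrest).2]

lemma pvZipFlags (xs : List (String × Int × Int × Int × Int)) :
    xs.zip (pvBFlags xs) = pvAnn false xs := by
  have h := pvZip_eq_ann xs "equal"
  simpa [pvBFlags] using h

-- ===== VERDICT (by name: the statement is the Claim_ definition above) =====
theorem coalesce_diff_opcodes_py_spec : Claim_equal_coalesce_diff_opcodes_py := by
  intro opcodes _
  unfold Spec_coalesce_diff_opcodes_py coalesce_diff_opcodes_py coalesce_diff_opcodes_py_alt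
  by_cases h : opcodes = []
  · simp [h]
  · rw [if_neg h, if_neg h, (pvMain opcodes.length opcodes le_rfl).1, pvZipFlags]
    rfl
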